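-- pv_equiv track=rewrite | github.com/seret1234-dot/weiss-chess-training | bn_manual_sets/bn positions_24-3-2026/bn2/4/split_and_reshuffle_folder10_to_12.py | analyze_sequence
-- ===== SOURCE A (Python) =====
-- from collections import Counter, defaultdict
--
-- def piece_signature(pos):
--     return (
--         pos.get("white_king"),
--         pos.get("white_knight"),
--         pos.get("white_bishop"),
--     )
--
-- def change_signature(a, b):
--     changed = []
--     if a.get("white_king") != b.get("white_king"):
--         changed.append("K")
--     if a.get("white_knight") != b.get("white_knight"):
--         changed.append("N")
--     if a.get("white_bishop") != b.get("white_bishop"):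
--         changed.append("B")
--     return tuple(changed)
--
-- def exact_same_position(a, b):
--     return piece_signature(a) == piece_signature(b)
--
-- def analyze_sequence(seq):
--     stats = Counter()
--     if len(seq) <= 1:
--         return stats
--
--     sigs = []
--     for i in range(1, len(seq)):
--         prev = seq[i - 1]
--         cur = seq[i]
--         sig = change_signature(prev, cur)
--         sigs.append(sig)
--
--         stats[f"change_{len(sig)}"] += 1
--         if exact_same_position(prev, cur):
--             stats["exact_repeats"] += 1
--
--     for i in range(2, len(sigs)):
--         if sigs[i] == sigs[i - 1] == sigs[i - 2]:
--             stats["triple_repeat_same_sig"] += 1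
--
--     return stats
-- ===== SOURCE B (Python) =====
-- from collections import Counter
--
--
-- def change_signature(a, b):
--     changed = []
--     if a.get("white_king") != b.get("white_king"):
--         changed.append("K")
--     if a.get("white_knight") != b.get("white_knight"):
--         changed.append("N")
--     if a.get("white_bishop") != b.get("white_bishop"):
--         changed.append("B")
--     return tuple(changed)
--
--
-- def analyze_sequence(seq):
--     # Single pass: a run-length counter over consecutive equal signatures
--     # replaces the sigs list and the second three-element-window loop.
--     stats = Counter()
--     if len(seq) <= 1:
--         return stats
--     prev_sig = None
--     run = 0
--     triples = 0
--     prev = seq[0]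
--     for cur in seq[1:]:
--         sig = change_signature(prev, cur)
--         stats[f"change_{len(sig)}"] += 1
--         if not sig:
--             stats["exact_repeats"] += 1
--         run = run + 1 if sig == prev_sig else 1
--         if run >= 3:
--             triples += 1
--         prev_sig = sig
--         prev = cur
--     if triples:
--         stats["triple_repeat_same_sig"] = triples
--     return stats
-- ===== Notes on version B (the rewrite author's own statement) =====
-- stated objective: simpler
-- what changed: Single pass over seq with a run-length counter of consecutive equal signatures replacing A's materialised sigs list and its second three-element-window loop.
import Mathlib
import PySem

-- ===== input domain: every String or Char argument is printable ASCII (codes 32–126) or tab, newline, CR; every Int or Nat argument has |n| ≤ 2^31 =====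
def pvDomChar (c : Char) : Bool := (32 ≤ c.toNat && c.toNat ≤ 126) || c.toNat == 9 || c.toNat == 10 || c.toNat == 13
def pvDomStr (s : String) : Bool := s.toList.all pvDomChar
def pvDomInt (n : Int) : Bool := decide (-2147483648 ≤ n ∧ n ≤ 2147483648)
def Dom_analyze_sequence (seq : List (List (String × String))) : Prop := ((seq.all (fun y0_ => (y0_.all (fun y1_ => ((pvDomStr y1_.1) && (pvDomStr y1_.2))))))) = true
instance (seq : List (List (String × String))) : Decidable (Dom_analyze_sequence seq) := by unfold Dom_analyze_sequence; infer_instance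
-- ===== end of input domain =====

-- B makes a single pass with a run-length counter of consecutive equal signatures,
-- replacing A's materialised sigs list and its second three-element-window loop (objective: simpler).

-- ===== PORT A =====
-- pos.get(k): dict lookup (first match in the association list)
def pyget (pos : List (String × String)) (k : String) : Option String :=
  (PySem.Dict.mk pos).get? k

def piece_signature (pos : List (String × String)) :
    Option String × Option String × Option String :=
  (pyget pos "white_king", pyget pos "white_knight", pyget pos "white_bishop")

def change_signature (a b : List (String × String)) : List String :=
  let changed : List String := []
  let changed := if pyget a "white_king" ≠ pyget b "white_king" then changed ++ ["K"] else changed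
  let changed := if pyget a "white_knight" ≠ pyget b "white_knight" then changed ++ ["N"] else changed
  let changed := if pyget a "white_bishop" ≠ pyget b "white_bishop" then changed ++ ["B"] else changed
  changed

def exact_same_position (a b : List (String × String)) : Bool :=
  decide (piece_signature a = piece_signature b)

-- f"change_{n}"
def changeKey (n : Nat) : String :=
  String.ofList ("change_".toList ++ PySem.Int.toChars (n : Int))

-- body of A's first loop (over i in range(1, len(seq))); state = (sigs, stats)
def aStep1 (seq : List (List (String × String)))
    (st : List (List String) × PySem.Dict String Int) (i : Int) :
    List (List String) × PySem.Dict String Int :=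
  let prev := PySem.List.pyGetD seq (i - 1) []
  let cur := PySem.List.pyGetD seq i []
  let sig := change_signature prev cur
  let sigs := st.1 ++ [sig]
  let stats := st.2.modify (changeKey sig.length) 0 (· + 1)
  let stats := if exact_same_position prev cur then stats.modify "exact_repeats" 0 (· + 1) else stats
  (sigs, stats)

-- body of A's second loop (over i in range(2, len(sigs)))
def aStep2 (sigs : List (List String)) (stats : PySem.Dict String Int) (i : Int) :
    PySem.Dict String Int :=
  if PySem.List.pyGetD sigs i [] = PySem.List.pyGetD sigs (i - 1) [] ∧
     PySem.List.pyGetD sigs (i - 1) [] = PySem.List.pyGetD sigs (i - 2) []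
  then stats.modify "triple_repeat_same_sig" 0 (· + 1) else stats

def analyze_sequence (seq : List (List (String × String))) : List (String × Int) :=
  let stats : PySem.Dict String Int := PySem.Dict.empty
  if seq.length ≤ 1 then stats.items
  else
    let r := (PySem.List.pyRange 1 (seq.length : Int)).foldl (aStep1 seq) ([], stats)
    let stats2 := (PySem.List.pyRange 2 (r.1.length : Int)).foldl (aStep2 r.1) r.2
    stats2.items

-- ===== PORT B =====
-- one step of B's single pass; state = (prev, prev_sig, run, stats, triples)
def bstep
    (st : List (String × String) × Option (List String) × Int × PySem.Dict String Int × Int)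
    (cur : List (String × String)) :
    List (String × String) × Option (List String) × Int × PySem.Dict String Int × Int :=
  let sig := change_signature st.1 cur
  let stats := st.2.2.2.1.modify (changeKey sig.length) 0 (· + 1)
  let stats := if sig = [] then stats.modify "exact_repeats" 0 (· + 1) else stats
  let run := if some sig = st.2.1 then st.2.2.1 + 1 else 1
  let triples := if run ≥ 3 then st.2.2.2.2 + 1 else st.2.2.2.2
  (cur, some sig, run, stats, triples)

def analyze_sequence_alt (seq : List (List (String × String))) : List (String × Int) :=
  let stats : PySem.Dict String Int := PySem.Dict.empty
  if seq.length ≤ 1 then stats.items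
  else
    match seq with
    | [] => stats.items
    | prev :: rest =>
      let st := rest.foldl bstep (prev, none, 0, stats, 0)
      let stats := st.2.2.2.1
      let triples := st.2.2.2.2
      if triples ≠ 0 then (stats.insert "triple_repeat_same_sig" triples).items
      else stats.items

-- ===== PRECONDITION & SPEC =====
def Spec_analyze_sequence (seq : List (List (String × String))) (out : List (String × Int)) : Prop := out = analyze_sequence_alt seq
instance (seq : List (List (String × String))) (out : List (String × Int)) : Decidable (Spec_analyze_sequence seq out) := by unfold Spec_analyze_sequence; infer_instance

-- ===== CLAIM (what is proved, stated in full; the proofs are below) =====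
def Claim_equal_analyze_sequence : Prop := ∀ (seq : List (List (String × String))), Dom_analyze_sequence seq → Spec_analyze_sequence seq (analyze_sequence seq)

-- ===== LEMMAS AND PROOFS =====

-- the list of adjacent-pair change signatures
def sigsOf (seq : List (List (String × String))) : List (List String) :=
  (seq.zip seq.tail).map (fun p => change_signature p.1 p.2)

-- stats update per signature (common to both loops' counting part)
def stepCount (d : PySem.Dict String Int) (sig : List String) : PySem.Dict String Int :=
  let d1 := d.modify (changeKey sig.length) 0 (· + 1)
  if sig = [] then d1.modify "exact_repeats" 0 (· + 1) else d1

def applyT (d : PySem.Dict String Int) : PySem.Dict String Int :=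
  d.modify "triple_repeat_same_sig" 0 (· + 1)

-- number of adjacent equal triples (A's second loop counts exactly these)
def tcount {α : Type} [DecidableEq α] : List α → Nat
  | a :: b :: c :: t => (if c = b ∧ b = a then 1 else 0) + tcount (b :: c :: t)
  | _ => 0

-- triples still to be counted, given the previous element a with current run length r
def tcountCtx {α : Type} [DecidableEq α] (a : α) (r : Int) : List α → Nat
  | [] => 0
  | x :: xs =>
    (if (if x = a then r + 1 else 1) ≥ 3 then 1 else 0) +
      tcountCtx x (if x = a then r + 1 else 1) xs

-- B's step on the signature sequence; state = (prev_sig, run, stats, triples)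
def gstep (st : Option (List String) × Int × PySem.Dict String Int × Int)
    (sig : List String) : Option (List String) × Int × PySem.Dict String Int × Int :=
  let run := if some sig = st.1 then st.2.1 + 1 else 1
  (some sig, run, stepCount st.2.2.1 sig,
   if run ≥ 3 then st.2.2.2 + 1 else st.2.2.2)

lemma esp_eq (a b : List (String × String)) :
    exact_same_position a b = decide (change_signature a b = []) := by
  unfold exact_same_position
  rw [decide_eq_decide]
  by_cases h1 : pyget a "white_king" = pyget b "white_king" <;>
  by_cases h2 : pyget a "white_knight" = pyget b "white_knight" <;>
  by_cases h3 : pyget a "white_bishop" = pyget b "white_bishop" <;>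
  simp [piece_signature, change_signature, Prod.ext_iff, h1, h2, h3]

lemma changeKey_ne (n : Nat) : ("triple_repeat_same_sig" == changeKey n) = false := by
  rw [beq_eq_false_iff_ne]
  intro h
  have h2 : "triple_repeat_same_sig".toList = "change_".toList ++ PySem.Int.toChars (n : Int) := by
    rw [h, changeKey, String.toList_ofList]
  rw [show "triple_repeat_same_sig".toList = 't' :: "riple_repeat_same_sig".toList from by decide,
      show "change_".toList = 'c' :: "hange_".toList from by decide] at h2
  simp at h2

lemma exact_ne : ("triple_repeat_same_sig" == "exact_repeats") = false := by decide

lemma contains_stepCount (d : PySem.Dict String Int) (sig : List String) :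
    (stepCount d sig).contains "triple_repeat_same_sig" = d.contains "triple_repeat_same_sig" := by
  unfold stepCount
  by_cases hx : sig = [] <;>
    simp [hx, PySem.Dict.contains_modify, changeKey_ne, exact_ne]

lemma contains_fold : ∀ (s : List (List String)) (d : PySem.Dict String Int),
    (s.foldl stepCount d).contains "triple_repeat_same_sig" = d.contains "triple_repeat_same_sig" := by
  intro s
  induction s with
  | nil => intro d; rfl
  | cons x t ih => intro d; rw [List.foldl_cons, ih, contains_stepCount]

lemma modify_eq_insert {κ ν : Type} [BEq κ] [LawfulBEq κ] (d : PySem.Dict κ ν) (k : κ) (d0 : ν) (f : ν → ν) :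
    d.modify k d0 f = d.insert k (f (d.getD k d0)) := PySem.Dict.ext_iff.mpr rfl

lemma iterate_modify (m : Nat) (d : PySem.Dict String Int)
    (h : d.contains "triple_repeat_same_sig" = false) :
    applyT^[m + 1] d = d.insert "triple_repeat_same_sig" ((m : Int) + 1) := by
  induction m with
  | zero =>
    show applyT d = _
    rw [applyT, modify_eq_insert, PySem.Dict.getD_of_not_contains d 0 h]
    norm_num
  | succ m ih =>
    rw [Function.iterate_succ_apply', ih, applyT, modify_eq_insert,
        PySem.Dict.getD_insert_self, PySem.Dict.insert_insert_self]
    push_cast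
    ring_nf

-- two-element window over indices equals a fold over adjacent pairs
lemma foldl_window2 {α σ : Type} (xs : List α) (d : α) (f : σ → α → α → σ) :
    ∀ (n k : Nat), xs.length - k = n → ∀ (init : σ),
      (PySem.List.pyRange ((k : Int) + 1) (xs.length : Int)).foldl
        (fun s i => f s (PySem.List.pyGetD xs (i - 1) d) (PySem.List.pyGetD xs i d)) init
      = ((xs.drop k).zip (xs.drop (k + 1))).foldl (fun s p => f s p.1 p.2) init := by
  intro n
  induction n with
  | zero =>
    intro k hk init
    rw [PySem.List.pyRange_one_eq_nil (by omega),
        List.drop_eq_nil_of_le (show xs.length ≤ k + 1 by omega), List.zip_nil_right]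
    rfl
  | succ n ih =>
    intro k hk init
    by_cases hlt : k + 1 < xs.length
    · rw [PySem.List.pyRange_one_cons (show (k : Int) + 1 < (xs.length : Int) by omega),
          List.foldl_cons]
      have e1 : PySem.List.pyGetD xs ((k : Int) + 1 - 1) d = xs[k]'(by omega) := by
        rw [show (k : Int) + 1 - 1 = ((k : Nat) : Int) by ring,
            PySem.List.pyGetD_natCast, List.getD_eq_getElem xs d (by omega)]
      have e2 : PySem.List.pyGetD xs ((k : Int) + 1) d = xs[k + 1]'hlt := by
        rw [show (k : Int) + 1 = ((k + 1 : Nat) : Int) by push_cast; ring,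
            PySem.List.pyGetD_natCast, List.getD_eq_getElem xs d hlt]
      rw [e1, e2,
          show ((k : Int) + 1) + 1 = ((k + 1 : Nat) : Int) + 1 by push_cast; ring,
          ih (k + 1) (by omega),
          List.drop_eq_getElem_cons (show k < xs.length by omega),
          List.drop_eq_getElem_cons hlt, List.zip_cons_cons, List.foldl_cons]
    · rw [PySem.List.pyRange_one_eq_nil (by omega),
          List.drop_eq_nil_of_le (show xs.length ≤ k + 1 by omega), List.zip_nil_right]
      rfl

-- three-element window over indices equals a fold over adjacent triples
lemma foldl_window3 {α σ : Type} (xs : List α) (d : α) (f : σ → α → α → α → σ) :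
    ∀ (n k : Nat), xs.length - k = n → ∀ (init : σ),
      (PySem.List.pyRange ((k : Int) + 2) (xs.length : Int)).foldl
        (fun s i => f s (PySem.List.pyGetD xs i d) (PySem.List.pyGetD xs (i - 1) d)
          (PySem.List.pyGetD xs (i - 2) d)) init
      = (((xs.drop k).zip (xs.drop (k + 1))).zip (xs.drop (k + 2))).foldl
          (fun s p => f s p.2 p.1.2 p.1.1) init := by
  intro n
  induction n with
  | zero =>
    intro k hk init
    rw [PySem.List.pyRange_one_eq_nil (by omega),
        List.drop_eq_nil_of_le (show xs.length ≤ k + 2 by omega), List.zip_nil_right]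
    rfl
  | succ n ih =>
    intro k hk init
    by_cases hlt : k + 2 < xs.length
    · rw [PySem.List.pyRange_one_cons (show (k : Int) + 2 < (xs.length : Int) by omega),
          List.foldl_cons]
      have e0 : PySem.List.pyGetD xs ((k : Int) + 2) d = xs[k + 2]'hlt := by
        rw [show (k : Int) + 2 = ((k + 2 : Nat) : Int) by push_cast; ring,
            PySem.List.pyGetD_natCast, List.getD_eq_getElem xs d hlt]
      have e1 : PySem.List.pyGetD xs ((k : Int) + 2 - 1) d = xs[k + 1]'(by omega) := by
        rw [show (k : Int) + 2 - 1 = ((k + 1 : Nat) : Int) by push_cast; ring,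
            PySem.List.pyGetD_natCast, List.getD_eq_getElem xs d (by omega)]
      have e2 : PySem.List.pyGetD xs ((k : Int) + 2 - 2) d = xs[k]'(by omega) := by
        rw [show (k : Int) + 2 - 2 = ((k : Nat) : Int) by ring,
            PySem.List.pyGetD_natCast, List.getD_eq_getElem xs d (by omega)]
      rw [e0, e1, e2,
          show ((k : Int) + 2) + 1 = ((k + 1 : Nat) : Int) + 2 by push_cast; ring,
          ih (k + 1) (by omega)]
      simp only [show k + 1 + 1 = k + 2 from by omega, show k + 1 + 2 = k + 3 from by omega]
      rw [List.drop_eq_getElem_cons (show k < xs.length by omega)]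
      rw [show List.drop (k + 1) xs = xs[k + 1]'(by omega) :: List.drop (k + 2) xs from
            List.drop_eq_getElem_cons (show k + 1 < xs.length by omega)]
      rw [show List.drop (k + 2) xs = xs[k + 2]'hlt :: List.drop (k + 3) xs from
            List.drop_eq_getElem_cons hlt]
      simp only [List.zip_cons_cons, List.foldl_cons]
    · rw [PySem.List.pyRange_one_eq_nil (by omega),
          List.drop_eq_nil_of_le (show xs.length ≤ k + 2 by omega), List.zip_nil_right]
      rfl

-- a fold that both appends g p and updates the stats with g p splits into map and fold
lemma foldl_pair_build {α β γ : Type} (g : α → β) (h : γ → β → γ) :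
    ∀ (l : List α) (acc : List β) (d : γ),
      l.foldl (fun st p => (st.1 ++ [g p], h st.2 (g p))) (acc, d)
        = (acc ++ l.map g, (l.map g).foldl h d) := by
  intro l
  induction l with
  | nil => intro acc d; simp
  | cons x t ih => intro acc d; simp [List.foldl_cons, ih]

-- a conditional fold is an iterate, counted by countP
lemma foldl_ite_count {α γ : Type} (p : α → Prop) [DecidablePred p] (u : γ → γ) :
    ∀ (l : List α) (d : γ),
      l.foldl (fun st x => if p x then u st else st) d
        = u^[l.countP (fun x => decide (p x))] d := by
  intro l
  induction l with
  | nil => intro d; simp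
  | cons x t ih =>
    intro d
    by_cases hp : p x <;>
      simp [hp, ih, Function.iterate_succ_apply]

lemma countP_t3 {α : Type} [DecidableEq α] :
    ∀ s : List α,
      ((s.zip (s.drop 1)).zip (s.drop 2)).countP
          (fun q => decide (q.2 = q.1.2 ∧ q.1.2 = q.1.1)) = tcount s
  | [] => rfl
  | [_] => rfl
  | [_, _] => rfl
  | a :: b :: c :: t => by
    have ih : (((b :: c :: t).zip (c :: t)).zip t).countP
        (fun q => decide (q.2 = q.1.2 ∧ q.1.2 = q.1.1)) = tcount (b :: c :: t) :=
      countP_t3 (b :: c :: t)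
    show (List.countP (fun q => decide (q.2 = q.1.2 ∧ q.1.2 = q.1.1))
        (((a, b), c) :: ((b :: c :: t).zip (c :: t)).zip t)) = tcount (a :: b :: c :: t)
    rw [List.countP_cons, ih, tcount]
    by_cases h : c = b ∧ b = a <;> simp [h] <;> omega

lemma tcount_cons_ne {α : Type} [DecidableEq α] (x y : α) (t : List α) (h : ¬ y = x) :
    tcount (x :: y :: t) = tcount (y :: t) := by
  cases t with
  | nil => rfl
  | cons c t' => rw [tcount]; simp [h]

lemma ctx_main {α : Type} [DecidableEq α] :
    ∀ (xs : List α),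
      (∀ x : α, tcountCtx x 1 xs = tcount (x :: xs)) ∧
      (∀ (x : α) (r : Int), 2 ≤ r → tcountCtx x r xs = tcount (x :: x :: xs)) := by
  intro xs
  induction xs with
  | nil => exact ⟨fun x => rfl, fun x r _ => rfl⟩
  | cons y t ih =>
    obtain ⟨ih1, ih2⟩ := ih
    constructor
    · intro x
      rw [tcountCtx]
      by_cases hxy : y = x
      · subst hxy
        rw [if_pos rfl, if_neg (by omega : ¬ ((1 : Int) + 1 ≥ 3)),
            show (1 : Int) + 1 = 2 from by norm_num, ih2 y 2 le_rfl]
        omega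
      · rw [if_neg hxy, if_neg (by omega : ¬ ((1 : Int) ≥ 3)), ih1 y,
            tcount_cons_ne x y t hxy]
        omega
    · intro x r hr
      rw [tcountCtx]
      by_cases hxy : y = x
      · subst hxy
        rw [if_pos rfl, if_pos (by omega : (r : Int) + 1 ≥ 3), ih2 y (r + 1) (by omega)]
        have ht : tcount (y :: y :: y :: t) = (if y = y ∧ y = y then 1 else 0) + tcount (y :: y :: t) := by
          rw [tcount]
        rw [ht]
        simp
      · rw [if_neg hxy, if_neg (by omega : ¬ ((1 : Int) ≥ 3)), ih1 y]
        have ht : tcount (x :: x :: y :: t) = (if y = x ∧ x = x then 1 else 0) + tcount (x :: y :: t) := by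
          rw [tcount]
        rw [ht, tcount_cons_ne x y t hxy]
        simp [hxy]

lemma bstep_eq (prev : List (String × String))
    (st4 : Option (List String) × Int × PySem.Dict String Int × Int)
    (cur : List (String × String)) :
    bstep (prev, st4) cur = (cur, gstep st4 (change_signature prev cur)) := rfl

lemma bfold_snd :
    ∀ (rest : List (List (String × String))) (prev : List (String × String))
      (st4 : Option (List String) × Int × PySem.Dict String Int × Int),
      (rest.foldl bstep (prev, st4)).2
        = (((prev :: rest).zip rest).map (fun p => change_signature p.1 p.2)).foldl gstep st4 := by
  intro rest
  induction rest with
  | nil => intro prev st4; rfl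
  | cons c t ih =>
    intro prev st4
    rw [List.foldl_cons, bstep_eq, ih, List.zip_cons_cons, List.map_cons, List.foldl_cons]

lemma gstats : ∀ (s : List (List String)) (st4 : Option (List String) × Int × PySem.Dict String Int × Int),
    (s.foldl gstep st4).2.2.1 = s.foldl stepCount st4.2.2.1 := by
  intro s
  induction s with
  | nil => intro st4; rfl
  | cons x t ih => intro st4; rw [List.foldl_cons, List.foldl_cons, ih]; rfl

lemma gtrip_ctx : ∀ (s : List (List String)) (a : List String) (r : Int)
    (d : PySem.Dict String Int) (t : Int),
    (s.foldl gstep (some a, r, d, t)).2.2.2 = t + (tcountCtx a r s : Int) := by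
  intro s
  induction s with
  | nil => intro a r d t; simp [tcountCtx]
  | cons x xs ih =>
    intro a r d t
    rw [List.foldl_cons]
    show (xs.foldl gstep (gstep (some a, r, d, t) x)).2.2.2 = _
    rw [gstep]
    simp only [Option.some.injEq]
    rw [tcountCtx]
    by_cases hxa : x = a
    · simp only [if_pos hxa]
      by_cases h3 : r + 1 ≥ 3
      · rw [if_pos h3, if_pos h3, ih]
        push_cast
        ring
      · rw [if_neg h3, if_neg h3, ih]
        push_cast
        ring
    · simp only [if_neg hxa]
      rw [if_neg (by omega), if_neg (by omega), ih]
      push_cast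
      ring

lemma gtrip_init (s : List (List String)) (d : PySem.Dict String Int) :
    (s.foldl gstep (none, 0, d, 0)).2.2.2 = (tcount s : Int) := by
  cases s with
  | nil => rfl
  | cons x xs =>
    rw [List.foldl_cons]
    have hg : gstep (none, 0, d, 0) x = (some x, 1, stepCount d x, 0) := by
      simp [gstep]
    rw [hg, gtrip_ctx, (ctx_main xs).1 x]
    simp

lemma A_eq (seq : List (List (String × String))) (hl : ¬ seq.length ≤ 1) :
    analyze_sequence seq
      = (applyT^[tcount (sigsOf seq)] ((sigsOf seq).foldl stepCount PySem.Dict.empty)).items := by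
  unfold analyze_sequence
  rw [if_neg hl]
  have hb1 : aStep1 seq = fun st i =>
      (st.1 ++ [change_signature (PySem.List.pyGetD seq (i - 1) []) (PySem.List.pyGetD seq i [])],
       stepCount st.2 (change_signature (PySem.List.pyGetD seq (i - 1) []) (PySem.List.pyGetD seq i []))) := by
    funext st i
    simp only [aStep1, stepCount, esp_eq, decide_eq_true_eq]
  rw [hb1]
  have h1 : (PySem.List.pyRange 1 (seq.length : Int)).foldl
      (fun (st : List (List String) × PySem.Dict String Int) i =>
        (st.1 ++ [change_signature (PySem.List.pyGetD seq (i - 1) []) (PySem.List.pyGetD seq i [])],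
         stepCount st.2 (change_signature (PySem.List.pyGetD seq (i - 1) []) (PySem.List.pyGetD seq i []))))
      ([], (PySem.Dict.empty : PySem.Dict String Int))
      = (sigsOf seq, (sigsOf seq).foldl stepCount PySem.Dict.empty) := by
    have w2 := foldl_window2 seq ([] : List (String × String))
      (fun (st : List (List String) × PySem.Dict String Int) a b =>
        (st.1 ++ [change_signature a b], stepCount st.2 (change_signature a b)))
      (seq.length - 0) 0 rfl ([], (PySem.Dict.empty : PySem.Dict String Int))
    simp only [Nat.cast_zero, zero_add, List.drop_zero, List.drop_one] at w2
    rw [w2]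
    rw [foldl_pair_build (fun p : List (String × String) × List (String × String) =>
          change_signature p.1 p.2) stepCount (seq.zip seq.tail) [] PySem.Dict.empty]
    simp [sigsOf]
  rw [h1]
  have hb2 : aStep2 (sigsOf seq) = fun stats i =>
      (fun (stats : PySem.Dict String Int) (x y z : List String) =>
         if x = y ∧ y = z then applyT stats else stats) stats
        (PySem.List.pyGetD (sigsOf seq) i []) (PySem.List.pyGetD (sigsOf seq) (i - 1) [])
        (PySem.List.pyGetD (sigsOf seq) (i - 2) []) := by
    funext stats i
    simp only [aStep2, applyT]
  show (List.foldl (aStep2 (sigsOf seq)) ((sigsOf seq).foldl stepCount PySem.Dict.empty)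
      (PySem.List.pyRange 2 ((sigsOf seq).length : Int))).items = _
  rw [hb2]
  have w3 := foldl_window3 (sigsOf seq) ([] : List String)
    (fun (stats : PySem.Dict String Int) (x y z : List String) =>
      if x = y ∧ y = z then applyT stats else stats)
    ((sigsOf seq).length - 0) 0 rfl ((sigsOf seq).foldl stepCount PySem.Dict.empty)
  simp only [Nat.cast_zero, zero_add, List.drop_zero] at w3
  rw [w3]
  have wic := foldl_ite_count
    (fun q : (List String × List String) × List String => q.2 = q.1.2 ∧ q.1.2 = q.1.1)
    applyT (((sigsOf seq).zip ((sigsOf seq).drop 1)).zip ((sigsOf seq).drop 2))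
    ((sigsOf seq).foldl stepCount PySem.Dict.empty)
  beta_reduce at wic
  rw [wic, countP_t3]

lemma B_eq (p : List (String × String)) (rest : List (List (String × String)))
    (hl : ¬ (p :: rest).length ≤ 1) :
    analyze_sequence_alt (p :: rest)
      = (if ((tcount (sigsOf (p :: rest)) : Int)) ≠ 0
         then ((sigsOf (p :: rest)).foldl stepCount PySem.Dict.empty).insert
                "triple_repeat_same_sig" ((tcount (sigsOf (p :: rest)) : Int))
         else (sigsOf (p :: rest)).foldl stepCount PySem.Dict.empty).items := by
  unfold analyze_sequence_alt
  rw [if_neg hl]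
  show (if (rest.foldl bstep (p, none, 0, PySem.Dict.empty, 0)).2.2.2.2 ≠ 0
        then ((rest.foldl bstep (p, none, 0, PySem.Dict.empty, 0)).2.2.2.1.insert
               "triple_repeat_same_sig" (rest.foldl bstep (p, none, 0, PySem.Dict.empty, 0)).2.2.2.2).items
        else (rest.foldl bstep (p, none, 0, PySem.Dict.empty, 0)).2.2.2.1.items) = _
  have hs : (rest.foldl bstep (p, none, 0, PySem.Dict.empty, 0)).2
      = (sigsOf (p :: rest)).foldl gstep (none, 0, PySem.Dict.empty, 0) :=
    bfold_snd rest p (none, 0, PySem.Dict.empty, 0)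
  have hstats : (rest.foldl bstep (p, none, 0, PySem.Dict.empty, 0)).2.2.2.1
      = (sigsOf (p :: rest)).foldl stepCount PySem.Dict.empty := by
    rw [show (rest.foldl bstep (p, none, 0, PySem.Dict.empty, 0)).2.2.2.1
          = ((rest.foldl bstep (p, none, 0, PySem.Dict.empty, 0)).2).2.2.1 from rfl, hs]
    exact gstats (sigsOf (p :: rest)) (none, 0, PySem.Dict.empty, 0)
  have htrip : (rest.foldl bstep (p, none, 0, PySem.Dict.empty, 0)).2.2.2.2
      = (tcount (sigsOf (p :: rest)) : Int) := by
    rw [show (rest.foldl bstep (p, none, 0, PySem.Dict.empty, 0)).2.2.2.2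
          = ((rest.foldl bstep (p, none, 0, PySem.Dict.empty, 0)).2).2.2.2 from rfl, hs]
    exact gtrip_init (sigsOf (p :: rest)) PySem.Dict.empty
  rw [hstats, htrip, apply_ite PySem.Dict.items]

-- ===== VERDICT (by name: the statement is the Claim_ definition above) =====
theorem analyze_sequence_spec : Claim_equal_analyze_sequence := by
  intro seq _
  unfold Spec_analyze_sequence
  by_cases hl : seq.length ≤ 1
  · unfold analyze_sequence analyze_sequence_alt
    rw [if_pos hl, if_pos hl]
  · cases seq with
    | nil => simp at hl
    | cons p rest =>
      rw [A_eq _ hl, B_eq p rest hl]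
      have hc : ((sigsOf (p :: rest)).foldl stepCount PySem.Dict.empty).contains
          "triple_repeat_same_sig" = false := by
        rw [contains_fold]
        exact PySem.Dict.contains_empty _
      cases hm : tcount (sigsOf (p :: rest)) with
      | zero => simp
      | succ m =>
        rw [iterate_modify m _ hc,
            if_pos (show ((m + 1 : Nat) : Int) ≠ 0 by omega)]
        norm_cast
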